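-- pv_equiv track=rewrite | github.com/irfanulhaq228/AZTechTask | worker/processor.py | pick_best_field
-- ===== SOURCE A (Python) =====
-- def pick_best_field(headers: list[str], hints: tuple[str, ...]) -> str | None:
--     lowered = [(header, header.lower()) for header in headers]
--
--     for header, lowered_header in lowered:
--         if lowered_header in hints:
--             return header
--
--     for header, lowered_header in lowered:
--         if any(hint in lowered_header for hint in hints):
--             return header
--
--     return None
-- ===== SOURCE B (Python) =====
-- def pick_best_field(headers: list[str], hints: tuple[str, ...]) -> str | None:
--     candidate = None
--     for header in headers:
--         lowered = header.lower()
--         if lowered in hints: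
--             return header
--         if candidate is None and any(hint in lowered for hint in hints):
--             candidate = header
--     return candidate
-- ===== Notes on version B (the rewrite author's own statement) =====
-- stated objective: simpler
-- what changed: Replaces the precomputed (header, lowered) list and two full scans by a single pass that returns on an exact match and keeps the first substring match in one fallback variable.
import Mathlib
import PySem

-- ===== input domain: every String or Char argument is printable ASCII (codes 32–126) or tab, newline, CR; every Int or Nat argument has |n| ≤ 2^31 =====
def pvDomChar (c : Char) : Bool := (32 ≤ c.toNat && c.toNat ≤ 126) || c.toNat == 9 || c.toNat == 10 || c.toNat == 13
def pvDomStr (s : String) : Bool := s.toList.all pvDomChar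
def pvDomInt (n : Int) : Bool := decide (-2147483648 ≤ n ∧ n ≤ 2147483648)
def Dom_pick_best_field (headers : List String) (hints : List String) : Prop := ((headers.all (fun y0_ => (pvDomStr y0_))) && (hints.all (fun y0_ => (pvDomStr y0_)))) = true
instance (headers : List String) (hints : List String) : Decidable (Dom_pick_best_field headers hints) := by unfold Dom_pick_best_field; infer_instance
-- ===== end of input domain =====

-- B replaces A's precomputed lowered list and two full scans by one pass holding a single fallback candidate (simpler).

-- ===== PORT A =====
-- first loop: exact match of the lowered header against hints
def pickLoop1 (lowered : List (String × String)) (hints : List String) : Option String :=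
  match lowered with
  | [] => none
  | (h, lh) :: rest => if hints.contains lh then some h else pickLoop1 rest hints

-- second loop: any hint a substring of the lowered header
def pickLoop2 (lowered : List (String × String)) (hints : List String) : Option String :=
  match lowered with
  | [] => none
  | (h, lh) :: rest =>
      if hints.any (fun hint => PySem.Str.isIn hint lh) then some h else pickLoop2 rest hints

def pick_best_field (headers : List String) (hints : List String) : Option String :=
  let lowered := headers.map (fun h => (h, PySem.Str.lower h))
  match pickLoop1 lowered hints with
  | some h => some h
  | none => pickLoop2 lowered hints

-- ===== PORT B =====
-- single pass: return on exact match, remember first substring match as fallback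
def pickScan (headers : List String) (hints : List String) (candidate : Option String) : Option String :=
  match headers with
  | [] => candidate
  | h :: rest =>
      let lh := PySem.Str.lower h
      if hints.contains lh then some h
      else
        let candidate' :=
          if candidate.isNone && hints.any (fun hint => PySem.Str.isIn hint lh) then some h
          else candidate
        pickScan rest hints candidate'

def pick_best_field_alt (headers : List String) (hints : List String) : Option String :=
  pickScan headers hints none

-- ===== PRECONDITION & SPEC =====
def Spec_pick_best_field (headers : List String) (hints : List String) (out : Option String) : Prop := out = pick_best_field_alt headers hints
instance (headers : List String) (hints : List String) (out : Option String) : Decidable (Spec_pick_best_field headers hints out) := by unfold Spec_pick_best_field; infer_instance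

-- ===== CLAIM (what is proved, stated in full; the proofs are below) =====
def Claim_equal_pick_best_field : Prop := ∀ (headers : List String) (hints : List String), Dom_pick_best_field headers hints → Spec_pick_best_field headers hints (pick_best_field headers hints)

-- ===== LEMMAS AND PROOFS =====
-- invariant of B's single pass against A's two loops
theorem pickScan_eq (hints : List String) (headers : List String) (cand : Option String) :
    pickScan headers hints cand =
      match pickLoop1 (headers.map (fun h => (h, PySem.Str.lower h))) hints with
      | some h => some h
      | none =>
        match cand with
        | some c => some c
        | none => pickLoop2 (headers.map (fun h => (h, PySem.Str.lower h))) hints := by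
  induction headers generalizing cand with
  | nil => cases cand <;> simp [pickScan, pickLoop1, pickLoop2]
  | cons h rest ih =>
    simp only [pickScan, List.map_cons, pickLoop1, pickLoop2]
    by_cases hc : PySem.Str.lower h ∈ hints
    · simp [hc]
    · cases cand with
      | some c => simp [hc, ih]
      | none =>
        by_cases ha : ∃ x ∈ hints, PySem.Chars.isIn x.toList (PySem.Chars.lower h.toList) = true
        · simp [hc, ha, ih]
        · simp [hc, ha, ih]

-- ===== VERDICT (by name: the statement is the Claim_ definition above) =====
theorem pick_best_field_spec : Claim_equal_pick_best_field := by
  intro headers hints _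
  unfold Spec_pick_best_field pick_best_field pick_best_field_alt
  rw [pickScan_eq]
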